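-- pv_equiv track=rewrite | github.com/ishon19/vigilant-couscous | 2249-count-the-hidden-sequences/count-the-hidden-sequences.py | numberOfArrays
-- ===== SOURCE A (Python) =====
-- from typing import List
--
-- def numberOfArrays(differences: List[int], lower: int, upper: int) -> int:
--     prefix_sum = 0
--     min_sum = 0
--     max_sum = 0
--
--     for diff in differences:
--         prefix_sum += diff
--         min_sum = min(min_sum, prefix_sum)
--         max_sum = max(max_sum, prefix_sum)
--
--     counts = (upper - max_sum) - (lower - min_sum) + 1
--     return max(0, counts)
-- ===== SOURCE B (Python) =====
-- from typing import List
--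
-- def numberOfArrays(differences: List[int], lower: int, upper: int) -> int:
--     # Walk the differences right-to-left. (lo, hi) is the min/max prefix sum
--     # (over all prefixes, including the empty one) of the suffix processed so
--     # far: prepending d maps every prefix sum s to d + s and re-adds the empty
--     # prefix 0, hence the recurrence. No running prefix-sum accumulator.
--     lo = 0
--     hi = 0
--     for d in reversed(differences):
--         lo = min(0, d + lo)
--         hi = max(0, d + hi)
--     return max(0, (upper - hi) - (lower - lo) + 1)
-- ===== Notes on version B (the rewrite author's own statement) =====
-- stated objective: alternative
-- what changed: B processes the differences right-to-left with the recurrence lo=min(0,d+lo), hi=max(0,d+hi), maintaining the prefix-sum span of the growing suffix; it keeps no running prefix sum at all, unlike A's forward scan carrying (prefix_sum, min_sum, max_sum).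
import Mathlib
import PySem

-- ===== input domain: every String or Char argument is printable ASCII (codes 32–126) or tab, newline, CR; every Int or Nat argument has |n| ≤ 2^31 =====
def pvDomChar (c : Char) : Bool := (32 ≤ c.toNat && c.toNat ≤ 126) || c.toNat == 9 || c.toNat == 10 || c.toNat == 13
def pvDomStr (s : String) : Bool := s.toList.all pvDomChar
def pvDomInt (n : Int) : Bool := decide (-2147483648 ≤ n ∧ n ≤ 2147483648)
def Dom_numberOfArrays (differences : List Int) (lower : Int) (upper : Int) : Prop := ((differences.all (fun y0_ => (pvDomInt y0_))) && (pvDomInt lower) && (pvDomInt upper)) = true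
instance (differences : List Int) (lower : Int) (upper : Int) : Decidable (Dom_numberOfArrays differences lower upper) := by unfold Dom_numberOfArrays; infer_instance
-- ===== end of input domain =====

-- B replaces A's forward scan carrying a running prefix sum by a right-to-left pass
-- maintaining the suffix's prefix-sum span (lo, hi); alternative decomposition, same cost.

-- ===== PORT A =====
-- A: one forward loop over differences carrying (prefix_sum, min_sum, max_sum).
def numberOfArrays (differences : List Int) (lower : Int) (upper : Int) : Int :=
  let st := differences.foldl
    (fun (s : Int × Int × Int) diff =>
      let prefix_sum := s.1 + diff
      (prefix_sum, min s.2.1 prefix_sum, max s.2.2 prefix_sum))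
    (0, 0, 0)
  let counts := (upper - st.2.2) - (lower - st.2.1) + 1
  max 0 counts

-- ===== PORT B =====
-- B: for d in reversed(differences): lo = min(0, d+lo); hi = max(0, d+hi)
def numberOfArrays_alt (differences : List Int) (lower : Int) (upper : Int) : Int :=
  let st := differences.reverse.foldl
    (fun (s : Int × Int) d => (min 0 (d + s.1), max 0 (d + s.2)))
    (0, 0)
  max 0 ((upper - st.2) - (lower - st.1) + 1)

-- ===== PRECONDITION & SPEC =====
def Spec_numberOfArrays (differences : List Int) (lower : Int) (upper : Int) (out : Int) : Prop := out = numberOfArrays_alt differences lower upper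
instance (differences : List Int) (lower : Int) (upper : Int) (out : Int) : Decidable (Spec_numberOfArrays differences lower upper out) := by unfold Spec_numberOfArrays; infer_instance

-- ===== CLAIM =====
def Claim_equal_numberOfArrays : Prop := ∀ (differences : List Int) (lower : Int) (upper : Int), Dom_numberOfArrays differences lower upper → Spec_numberOfArrays differences lower upper (numberOfArrays differences lower upper)

-- ===== LEMMAS AND PROOFS =====
-- B's backward loop, as a foldr (foldl over reverse = foldr with flipped step).
def pvSpan (l : List Int) : Int × Int :=
  l.foldr (fun d (s : Int × Int) => (min 0 (d + s.1), max 0 (d + s.2))) (0, 0)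

theorem pvSpan_cons (d : Int) (l : List Int) :
    pvSpan (d :: l) = (min 0 (d + (pvSpan l).1), max 0 (d + (pvSpan l).2)) := rfl

theorem pvSpan_bounds (l : List Int) : (pvSpan l).1 ≤ 0 ∧ 0 ≤ (pvSpan l).2 := by
  induction l with
  | nil => simp [pvSpan]
  | cons d ds ih => rw [pvSpan_cons]; constructor <;> simp

-- A's fold against B's span: invariant mn ≤ p ≤ mx.
theorem foldA_span (l : List Int) : ∀ (p mn mx : Int), mn ≤ p → p ≤ mx →
    l.foldl (fun (s : Int × Int × Int) diff =>
      let prefix_sum := s.1 + diff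
      (prefix_sum, min s.2.1 prefix_sum, max s.2.2 prefix_sum)) (p, mn, mx)
    = (p + l.sum, min mn (p + (pvSpan l).1), max mx (p + (pvSpan l).2)) := by
  induction l with
  | nil =>
    intro p mn mx h1 h2
    simp [pvSpan]; omega
  | cons d ds ih =>
    intro p mn mx h1 h2
    have hb := pvSpan_bounds ds
    simp only [List.foldl, List.sum_cons, pvSpan_cons]
    rw [ih (p + d) (min mn (p + d)) (max mx (p + d)) (by omega) (by omega)]
    refine Prod.ext (by ring) (Prod.ext ?_ ?_) <;> simp <;> omega

-- ===== VERDICT =====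
theorem numberOfArrays_spec : Claim_equal_numberOfArrays := by
  intro differences lower upper _
  unfold Spec_numberOfArrays numberOfArrays numberOfArrays_alt
  simp only [List.foldl_reverse, foldA_span differences 0 0 0 le_rfl le_rfl, zero_add]
  have hb := pvSpan_bounds differences
  show max 0 ((upper - max 0 (pvSpan differences).2) - (lower - min 0 (pvSpan differences).1) + 1)
      = max 0 ((upper - (pvSpan differences).2) - (lower - (pvSpan differences).1) + 1)
  rw [max_eq_right hb.2, min_eq_right hb.1]
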